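-- pv_equiv track=rewrite | github.com/bsdtux/advent-of-code | year_2020/day_4/__init__.py | create_passports_from_parts
-- ===== SOURCE A (Python) =====
-- def create_passports_from_parts(passport):
--     part_list = list()
--     temp_dict = {}
--
--     for part in passport:
--         if part == '':
--             part_list.append(temp_dict)
--             temp_dict = {}
--             continue
--         psplit = part.split(' ')
--         temp_dict.update(dict([d.split(':') for d in psplit]))
--
--     part_list.append(temp_dict)
--     return part_list
-- ===== SOURCE B (Python) =====
-- def create_passports_from_parts(passport):
--     # Two-phase decomposition: first group consecutive non-empty lines, then
--     # build one dict per group.  (Same return value as the original.)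
--     groups = [[]]
--     for part in passport:
--         if part == '':
--             groups.append([])
--         else:
--             groups[-1].append(part)
--
--     passports = []
--     for group in groups:
--         record = {}
--         for line in group:
--             record.update(dict(tok.split(':') for tok in line.split(' ')))
--         passports.append(record)
--     return passports
-- ===== Notes on version B (the rewrite author's own statement) =====
-- stated objective: alternative
-- what changed: Replaces A's single loop with an inline dict accumulator and flush-on-blank-line by a two-phase decomposition: first partition the lines into groups of consecutive non-empty lines (seeded with one empty group so the trailing/leading empty-record cases match), then build one dict per group in a second pass.
import Mathlib
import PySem

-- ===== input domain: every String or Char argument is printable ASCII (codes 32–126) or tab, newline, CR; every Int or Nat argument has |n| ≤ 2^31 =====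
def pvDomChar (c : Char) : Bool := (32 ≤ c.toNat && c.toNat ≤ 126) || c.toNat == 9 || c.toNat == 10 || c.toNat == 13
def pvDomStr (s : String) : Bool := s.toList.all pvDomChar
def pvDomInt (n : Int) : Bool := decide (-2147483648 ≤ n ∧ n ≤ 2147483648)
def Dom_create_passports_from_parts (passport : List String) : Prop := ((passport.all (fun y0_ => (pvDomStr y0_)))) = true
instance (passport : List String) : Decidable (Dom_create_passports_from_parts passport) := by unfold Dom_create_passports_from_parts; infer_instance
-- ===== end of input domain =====

-- B is an ALTERNATIVE decomposition (group lines first, then build one dict per group); return value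
-- proved equal to A's on all inputs where A returns (Pre_ excludes only those where A raises ValueError).

-- ===== PORT A =====
-- shared helper: both Pythons execute the identical statement
-- `temp.update(dict(t.split(':') for t in part.split(' ')))`; tokens that do not split
-- into exactly two pieces make Python raise ValueError — those inputs are excluded by Pre_
-- (the `match _ => ` fallback skipping such a token is never reached inside Pre_).
def pvLineStep (d : PySem.Dict String String) (part : String) : PySem.Dict String String :=
  let psplit := (PySem.Str.split? part " ").getD []      -- part.split(' '), sep ≠ "" so never none
  let pairs := psplit.map (fun t => (PySem.Str.split? t ":").getD [])
  PySem.Dict.update d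
    ((PySem.Dict.ofList (pairs.filterMap (fun l =>
        match l with
        | [k, v] => some (k, v)
        | _ => none))).items)

-- A: one fold over the lines with state (finished dicts, current dict); '' flushes the accumulator.
def create_passports_from_parts (passport : List String) : List (List (String × String)) :=
  let st := passport.foldl
    (fun (st : List (PySem.Dict String String) × PySem.Dict String String) part =>
      if part == "" then (st.1 ++ [st.2], PySem.Dict.empty)
      else (st.1, pvLineStep st.2 part))
    ([], PySem.Dict.empty)
  (st.1 ++ [st.2]).map (fun d => d.items)

-- ===== PORT B =====
-- B phase 1: group consecutive non-empty lines (Python's groups = done ++ [current group]).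
def pvGroups (passport : List String) : List (List String) × List String :=
  passport.foldl
    (fun (st : List (List String) × List String) part =>
      if part == "" then (st.1 ++ [st.2], [])
      else (st.1, st.2 ++ [part]))
    ([], [])

-- B phase 2: one dict per group.
def pvGroupDict (g : List String) : PySem.Dict String String :=
  g.foldl pvLineStep PySem.Dict.empty

def create_passports_from_parts_alt (passport : List String) : List (List (String × String)) :=
  let g := pvGroups passport
  (g.1 ++ [g.2]).map (fun grp => (pvGroupDict grp).items)

-- ===== PRECONDITION & SPEC =====
-- Pre_ excludes exactly the inputs where Python A raises ValueError: a non-empty line containing a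
-- space-separated token that does not split on ':' into exactly two pieces.
def Pre_create_passports_from_parts (passport : List String) : Prop :=
  ∀ part ∈ passport, part ≠ "" →
    ∀ t ∈ (PySem.Str.split? part " ").getD [], ((PySem.Str.split? t ":").getD []).length = 2
instance (passport : List String) : Decidable (Pre_create_passports_from_parts passport) := by
  unfold Pre_create_passports_from_parts; infer_instance

def pvWitness_create_passports_from_parts : List String := ["a:b", ""]

def Spec_create_passports_from_parts (passport : List String) (out : List (List (String × String))) : Prop := out = create_passports_from_parts_alt passport
instance (passport : List String) (out : List (List (String × String))) : Decidable (Spec_create_passports_from_parts passport out) := by unfold Spec_create_passports_from_parts; infer_instance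

-- ===== CLAIM (what is proved, stated in full; the proofs are below) =====
def Claim_equal_create_passports_from_parts : Prop := ∀ (passport : List String), Dom_create_passports_from_parts passport → Pre_create_passports_from_parts passport → Spec_create_passports_from_parts passport (create_passports_from_parts passport)

-- ===== LEMMAS AND PROOFS =====

-- Core invariant: A's fold over the remaining lines, started from a state that is the image of
-- B's grouping state under pvGroupDict, lands on the image of B's final grouping state.
lemma pvFold_eq (parts : List String) :
    ∀ (done : List (List String)) (curg : List String),
      parts.foldl
        (fun (st : List (PySem.Dict String String) × PySem.Dict String String) part =>
          if part == "" then (st.1 ++ [st.2], PySem.Dict.empty)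
          else (st.1, pvLineStep st.2 part))
        (done.map pvGroupDict, pvGroupDict curg)
      =
      (((parts.foldl
          (fun (st : List (List String) × List String) part =>
            if part == "" then (st.1 ++ [st.2], [])
            else (st.1, st.2 ++ [part]))
          (done, curg)).1).map pvGroupDict,
       pvGroupDict ((parts.foldl
          (fun (st : List (List String) × List String) part =>
            if part == "" then (st.1 ++ [st.2], [])
            else (st.1, st.2 ++ [part]))
          (done, curg)).2)) := by
  induction parts with
  | nil => intro done curg; rfl
  | cons p rest ih =>
    intro done curg
    by_cases hp : p = ""
    · subst hp
      simpa [List.map_append, pvGroupDict] using ih (done ++ [curg]) []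
    · have hne : (p == "") = false := by simp [hp]
      have hcur : pvLineStep (pvGroupDict curg) p = pvGroupDict (curg ++ [p]) := by
        simp [pvGroupDict, List.foldl_append]
      simp only [List.foldl_cons, hne, if_neg, Bool.false_eq_true, not_false_iff, hcur]
      exact ih done (curg ++ [p])

theorem create_passports_from_parts_equal (passport : List String) :
    create_passports_from_parts passport = create_passports_from_parts_alt passport := by
  unfold create_passports_from_parts create_passports_from_parts_alt pvGroups
  have h := pvFold_eq passport [] []
  simp only [List.map_nil] at h
  have h0 : pvGroupDict ([] : List String) = PySem.Dict.empty := rfl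
  rw [h0] at h
  rw [h]
  simp [List.map_append]

-- ===== VERDICT (by name: the statement is the Claim_ definition above) =====
theorem create_passports_from_parts_spec : Claim_equal_create_passports_from_parts := by
  intro passport _ _
  exact create_passports_from_parts_equal passport
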